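-- pv_equiv track=rewrite | github.com/SoaadHamood/ad-wise-agent | app/conversation_manager.py | _pinecone_id
-- ===== SOURCE A (Python) =====
-- from typing import Any, Dict, List, Optional, Tuple
--
-- CATEGORY_TREE: List[Dict] = [
--     {"id": "electronics", "label": "💻  Electronics & Computers", "pinecone_id": "electronics",
--      "subcategories": [{"id":"electronics","label":"Electronics (General)","pinecone_id":"electronics"},
--                        {"id":"computers","label":"Computers","pinecone_id":"computers"}]},
--     {"id": "home_kitchen", "label": "🏠  Home & Kitchen", "pinecone_id": "home-kitchen", "subcategories": []},
--     {"id": "sports_outdoors", "label": "⚽  Sports & Outdoors", "pinecone_id": "sports-outdoors", "subcategories": []},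
--     {"id": "beauty_health", "label": "💄  Beauty & Health", "pinecone_id": "health-household",
--      "subcategories": [{"id":"beauty","label":"Beauty","pinecone_id":"beauty"},
--                        {"id":"health-household","label":"Health & Household","pinecone_id":"health-household"}]},
--     {"id": "automotive", "label": "🚗  Automotive", "pinecone_id": "automotive", "subcategories": []},
--     {"id": "baby", "label": "🍼  Baby", "pinecone_id": "baby", "subcategories": []},
--     {"id": "pets", "label": "🐾  Pets", "pinecone_id": "pets", "subcategories": []},
--     {"id": "luggage", "label": "🧳  Luggage & Travel", "pinecone_id": "luggage", "subcategories": []},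
--     {"id": "arts_crafts", "label": "🎨  Arts & Crafts", "pinecone_id": "arts_crafts", "subcategories": []},
--     {"id": "industrial", "label": "🏭  Industrial & Scientific", "pinecone_id": "industrial-scientific", "subcategories": []},
-- ]
--
-- def _pinecone_id(cat_id: str, sub_id: Optional[str]) -> str:
--     if sub_id:
--         for c in CATEGORY_TREE:
--             for s in c.get("subcategories", []):
--                 if s["id"] == sub_id:
--                     return s["pinecone_id"]
--     for c in CATEGORY_TREE:
--         if c["id"] == cat_id:
--             return c["pinecone_id"]
--     return cat_id
-- ===== SOURCE B (Python) =====
-- from typing import Any, Dict, List, Optional, Tuple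
--
-- CATEGORY_TREE: List[Dict] = [
--     {"id": "electronics", "label": "💻  Electronics & Computers", "pinecone_id": "electronics",
--      "subcategories": [{"id":"electronics","label":"Electronics (General)","pinecone_id":"electronics"},
--                        {"id":"computers","label":"Computers","pinecone_id":"computers"}]},
--     {"id": "home_kitchen", "label": "🏠  Home & Kitchen", "pinecone_id": "home-kitchen", "subcategories": []},
--     {"id": "sports_outdoors", "label": "⚽  Sports & Outdoors", "pinecone_id": "sports-outdoors", "subcategories": []},
--     {"id": "beauty_health", "label": "💄  Beauty & Health", "pinecone_id": "health-household",
--      "subcategories": [{"id":"beauty","label":"Beauty","pinecone_id":"beauty"},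
--                        {"id":"health-household","label":"Health & Household","pinecone_id":"health-household"}]},
--     {"id": "automotive", "label": "🚗  Automotive", "pinecone_id": "automotive", "subcategories": []},
--     {"id": "baby", "label": "🍼  Baby", "pinecone_id": "baby", "subcategories": []},
--     {"id": "pets", "label": "🐾  Pets", "pinecone_id": "pets", "subcategories": []},
--     {"id": "luggage", "label": "🧳  Luggage & Travel", "pinecone_id": "luggage", "subcategories": []},
--     {"id": "arts_crafts", "label": "🎨  Arts & Crafts", "pinecone_id": "arts_crafts", "subcategories": []},
--     {"id": "industrial", "label": "🏭  Industrial & Scientific", "pinecone_id": "industrial-scientific", "subcategories": []},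
-- ]
--
-- def _pinecone_id(cat_id: str, sub_id: Optional[str]) -> str:
--     # Single fused recursive traversal of CATEGORY_TREE carrying two accumulators
--     # (first subcategory hit, first category hit) instead of two staged scans;
--     # a sub hit, if any, wins globally, matching the staged priority.
--     def go(tree, sub_hit, cat_hit):
--         if not tree:
--             if sub_hit is not None:
--                 return sub_hit
--             if cat_hit is not None:
--                 return cat_hit
--             return cat_id
--         c = tree[0]
--         if sub_hit is None and sub_id:
--             sub_hit = next((s["pinecone_id"] for s in c.get("subcategories", []) if s["id"] == sub_id), None)
--         if cat_hit is None and c["id"] == cat_id: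
--             cat_hit = c["pinecone_id"]
--         return go(tree[1:], sub_hit, cat_hit)
--     return go(CATEGORY_TREE, None, None)
-- ===== Notes on version B (the rewrite author's own statement) =====
-- stated objective: alternative
-- what changed: Replaces A's two staged scans (a nested sub-id scan, then a separate category scan) with one fused recursive traversal of CATEGORY_TREE that carries two accumulators (first subcategory hit, first category hit) and resolves the priority at the end.
import Mathlib
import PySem

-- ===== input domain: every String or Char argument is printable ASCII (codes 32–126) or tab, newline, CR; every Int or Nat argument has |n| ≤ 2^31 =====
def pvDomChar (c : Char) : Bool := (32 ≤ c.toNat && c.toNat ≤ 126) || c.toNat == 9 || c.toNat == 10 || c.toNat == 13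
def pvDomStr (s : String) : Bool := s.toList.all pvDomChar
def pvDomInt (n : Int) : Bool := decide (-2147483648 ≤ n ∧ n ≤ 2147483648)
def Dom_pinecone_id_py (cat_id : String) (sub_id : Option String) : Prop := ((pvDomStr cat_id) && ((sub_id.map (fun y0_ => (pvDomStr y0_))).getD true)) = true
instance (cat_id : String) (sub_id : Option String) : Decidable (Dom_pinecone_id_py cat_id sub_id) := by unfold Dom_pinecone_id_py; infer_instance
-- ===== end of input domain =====

-- B fuses A's two staged scans into one recursive traversal with two accumulators; objective: alternative.

-- ===== PORT A =====
-- CATEGORY_TREE as (id, pinecone_id, subcategories) where subcategories = list of (id, pinecone_id);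
-- labels are dropped since _pinecone_id never reads them.
def pvTree : List (String × String × List (String × String)) :=
  [ ("electronics", "electronics", [("electronics", "electronics"), ("computers", "computers")]),
    ("home_kitchen", "home-kitchen", []),
    ("sports_outdoors", "sports-outdoors", []),
    ("beauty_health", "health-household", [("beauty", "beauty"), ("health-household", "health-household")]),
    ("automotive", "automotive", []),
    ("baby", "baby", []),
    ("pets", "pets", []),
    ("luggage", "luggage", []),
    ("arts_crafts", "arts_crafts", []),
    ("industrial", "industrial-scientific", []) ]

-- A's inner loop: first subcategory with matching id
def pvFindSubIn : List (String × String) → String → Option String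
  | [], _ => none
  | (i, p) :: rest, sid => if i = sid then some p else pvFindSubIn rest sid

-- A's outer loop of the first for-block
def pvFindSub : List (String × String × List (String × String)) → String → Option String
  | [], _ => none
  | (_, _, subs) :: rest, sid =>
    match pvFindSubIn subs sid with
    | some p => some p
    | none => pvFindSub rest sid

-- A's second for-block: first category with matching id
def pvFindCat : List (String × String × List (String × String)) → String → Option String
  | [], _ => none
  | (i, p, _) :: rest, cid => if i = cid then some p else pvFindCat rest cid

def pinecone_id_py (cat_id : String) (sub_id : Option String) : String :=
  let viaSub :=
    match sub_id with
    | some s => if s = "" then none else pvFindSub pvTree s   -- `if sub_id:` truthiness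
    | none => none
  match viaSub with
  | some p => p
  | none =>
    match pvFindCat pvTree cat_id with
    | some p => p
    | none => cat_id

-- ===== PORT B =====
-- `next((s["pinecone_id"] for s in subs if s["id"] == sub_id), None)`
def pvFirstSub (subs : List (String × String)) (s : String) : Option String :=
  (subs.find? (fun p => p.1 == s)).map (·.2)

-- B's single recursive traversal carrying (sub_hit, cat_hit)
def pvGo (cat_id : String) (sub_id : Option String) :
    List (String × String × List (String × String)) → Option String → Option String → String
  | [], sh, ch =>
    match sh with
    | some p => p
    | none =>
      match ch with
      | some q => q
      | none => cat_id
  | c :: rest, sh, ch =>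
    let sh' :=
      match sh, sub_id with
      | none, some s => if s = "" then none else pvFirstSub c.2.2 s   -- `sub_hit is None and sub_id`
      | _, _ => sh
    let ch' :=
      match ch with
      | none => if c.1 = cat_id then some c.2.1 else none
      | _ => ch
    pvGo cat_id sub_id rest sh' ch'

def pinecone_id_py_alt (cat_id : String) (sub_id : Option String) : String :=
  pvGo cat_id sub_id pvTree none none

-- ===== PRECONDITION & SPEC =====
def Spec_pinecone_id_py (cat_id : String) (sub_id : Option String) (out : String) : Prop := out = pinecone_id_py_alt cat_id sub_id
instance (cat_id : String) (sub_id : Option String) (out : String) : Decidable (Spec_pinecone_id_py cat_id sub_id out) := by unfold Spec_pinecone_id_py; infer_instance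

-- ===== CLAIM (what is proved, stated in full; the proofs are below) =====
def Claim_equal_pinecone_id_py : Prop := ∀ (cat_id : String) (sub_id : Option String), Dom_pinecone_id_py cat_id sub_id → Spec_pinecone_id_py cat_id sub_id (pinecone_id_py cat_id sub_id)

-- ===== LEMMAS AND PROOFS =====

-- A's effective subcategory lookup (truthiness guard included)
def pvEffSub (sub_id : Option String) (tree : List (String × String × List (String × String))) : Option String :=
  match sub_id with
  | some s => if s = "" then none else pvFindSub tree s
  | none => none

-- B's generator-based inner find equals A's recursive inner scan
theorem pv_inner_eq (subs : List (String × String)) (s : String) :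
    pvFirstSub subs s = pvFindSubIn subs s := by
  induction subs with
  | nil => rfl
  | cons p rest ih =>
    obtain ⟨i, q⟩ := p
    by_cases h : i = s
    · simp [pvFirstSub, pvFindSubIn, h]
    · have hb : (i == s) = false := by simp [h]
      simp only [pvFirstSub, pvFindSubIn, List.find?_cons, hb, if_neg h]
      exact ih

-- once sub_hit is set, B returns it
theorem pv_go_some (cat_id : String) (sub_id : Option String)
    (tree : List (String × String × List (String × String))) (p : String) (ch : Option String) :
    pvGo cat_id sub_id tree (some p) ch = p := by
  induction tree generalizing ch with
  | nil => rfl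
  | cons c rest ih =>
    simp only [pvGo]
    exact ih _

-- the invariant of B's fused pass: with sub_hit = none and cat_hit = ch,
-- the result is the remaining sub scan, else ch, else the remaining cat scan, else cat_id
theorem pv_go_eq (cat_id : String) (sub_id : Option String)
    (tree : List (String × String × List (String × String))) (ch : Option String) :
    pvGo cat_id sub_id tree none ch =
      match pvEffSub sub_id tree with
      | some p => p
      | none =>
        match ch with
        | some q => q
        | none =>
          match pvFindCat tree cat_id with
          | some q => q
          | none => cat_id := by
  induction tree generalizing ch with
  | nil =>
    cases sub_id with
    | none => cases ch <;> rfl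
    | some s =>
      by_cases h : s = "" <;> cases ch <;> simp [pvGo, pvEffSub, pvFindSub, pvFindCat, h]
  | cons c rest ih =>
    obtain ⟨ci, cp, subs⟩ := c
    have step : ∀ ch' : Option String,
        (ch' = match ch with
               | none => if ci = cat_id then some cp else none
               | _ => ch) →
        (match ch' with
         | some q => q
         | none => match pvFindCat rest cat_id with | some q => q | none => cat_id) =
        (match ch with
         | some q => q
         | none => match pvFindCat ((ci, cp, subs) :: rest) cat_id with | some q => q | none => cat_id) := by
      intro ch' hch'
      cases ch with
      | some q => simp at hch'; simp [hch']
      | none =>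
        by_cases hc : ci = cat_id <;> simp [hc] at hch' <;> simp [hch', pvFindCat, hc]
    cases sub_id with
    | none =>
      simp only [pvGo]
      rw [ih]
      exact step _ rfl
    | some s =>
      by_cases hs : s = ""
      · simp only [pvGo, if_pos hs]
        rw [ih]
        have hE : pvEffSub (some s) ((ci, cp, subs) :: rest) = none := by
          simp [pvEffSub, hs]
        have hE' : pvEffSub (some s) rest = none := by
          simp [pvEffSub, hs]
        rw [hE, hE']
        exact step _ rfl
      · simp only [pvGo, if_neg hs]
        rw [pv_inner_eq]
        cases hfind : pvFindSubIn subs s with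
        | some p =>
          rw [pv_go_some]
          simp [pvEffSub, hs, pvFindSub, hfind]
        | none =>
          rw [ih]
          have hE : pvEffSub (some s) ((ci, cp, subs) :: rest) = pvEffSub (some s) rest := by
            simp [pvEffSub, hs, pvFindSub, hfind]
          rw [hE]
          cases hr : pvEffSub (some s) rest with
          | some p => simp
          | none => exact step _ rfl

-- ===== VERDICT (by name: the statement is the Claim_ definition above) =====
theorem pinecone_id_py_spec : Claim_equal_pinecone_id_py := by
  intro cat_id sub_id _
  unfold Spec_pinecone_id_py pinecone_id_py pinecone_id_py_alt
  rw [pv_go_eq]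
  cases sub_id with
  | none => simp [pvEffSub]
  | some s =>
    by_cases hs : s = "" <;> simp [pvEffSub, hs]
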